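-- pv_equiv track=rewrite | github.com/semacammetu/Hypothesis-driven-experiment-design-with-SEDML-extension | stl_fs_sm-master/stl_fs_sm-master/util/genetic_algorithm_util.py | generate_formula_from_template
-- ===== SOURCE A (Python) =====
-- def generate_formula_from_template(template_formula, parameter_domains):
--     # first process the formula:
--     formula_tokens = template_formula.split()
--     # tokens that start with p and has 2 characters:
--     parameters = [p for p in formula_tokens if p[0] == 'p' and len(p) == 2]
--     parameters_set = list(set(parameters))  # make unique
--
--     parameter_domains_in_formula = {}
--     for p in parameters_set:
--         for i in range(parameters.count(p)):
--             p_new = p + str(i)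
--             for j in range(len(formula_tokens)):
--                 if formula_tokens[j] == p:
--                     formula_tokens[j] = p_new
--                     parameter_domains_in_formula[p_new] = parameter_domains[p]
--                     break
--     new_formula = " ".join(formula_tokens)
--     return new_formula, parameter_domains_in_formula
-- ===== SOURCE B (Python) =====
-- def generate_formula_from_template(template_formula, parameter_domains):
--     # One left-to-right pass renames each parameter token with its running
--     # occurrence index; the collected counts then drive a grouped build of the
--     # domains dict.
--     tokens = template_formula.split()
--     counts = {}
--     for j, t in enumerate(tokens):
--         if t[0] == 'p' and len(t) == 2:
--             k = counts.get(t, 0)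
--             tokens[j] = t + str(k)
--             counts[t] = k + 1
--     parameter_domains_in_formula = {}
--     for p, c in counts.items():
--         for i in range(c):
--             parameter_domains_in_formula[p + str(i)] = parameter_domains[p]
--     return " ".join(tokens), parameter_domains_in_formula
-- ===== Notes on version B (the rewrite author's own statement) =====
-- stated objective: alternative
-- what changed: A picks the distinct parameters and, per parameter and per occurrence, rescans the token list (count() plus a find-first-and-replace inner scan); B renames every parameter token in one left-to-right pass with a running-occurrence counter dict and then builds the domains dict from the collected counts in a grouped second phase.
import Mathlib
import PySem

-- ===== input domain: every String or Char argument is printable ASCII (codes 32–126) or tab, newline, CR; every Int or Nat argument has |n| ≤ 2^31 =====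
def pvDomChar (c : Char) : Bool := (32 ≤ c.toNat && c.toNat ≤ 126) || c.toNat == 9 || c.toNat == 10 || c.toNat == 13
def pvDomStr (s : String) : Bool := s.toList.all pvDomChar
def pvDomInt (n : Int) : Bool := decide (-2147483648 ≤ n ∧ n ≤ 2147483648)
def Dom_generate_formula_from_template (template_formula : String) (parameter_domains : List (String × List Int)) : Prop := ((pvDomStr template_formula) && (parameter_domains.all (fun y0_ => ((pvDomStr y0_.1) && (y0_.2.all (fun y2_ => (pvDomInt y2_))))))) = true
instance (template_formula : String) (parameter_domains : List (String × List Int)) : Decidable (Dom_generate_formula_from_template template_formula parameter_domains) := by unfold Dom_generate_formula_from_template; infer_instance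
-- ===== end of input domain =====

-- B restructures A's per-parameter repeated scans (count + find-first-and-replace per
-- occurrence) into one left-to-right renaming pass with a running-occurrence counter dict,
-- then a grouped build of the domains dict from the collected counts (objective: alternative).

-- shared trivial token test: token t starts with 'p' and has exactly 2 characters
def pvIsParam (t : String) : Bool :=
  (t.toList.headD ' ' == 'p') && (PySem.Str.len t == 2)

-- ===== PORT A =====
-- inner j-loop of A: replace the FIRST token equal to p by pnew, report whether one was found
def pvAFind (p pnew : String) : List String → List String × Bool
  | [] => ([], false)
  | t :: ts =>
    if t == p then (pnew :: ts, true)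
    else (t :: (pvAFind p pnew ts).1, (pvAFind p pnew ts).2)

-- 'parameter_domains[p]' would raise KeyError on a missing key: Pre_ excludes that, so getD [] is exact there
def generate_formula_from_template (template_formula : String) (parameter_domains : List (String × List Int)) : String × (List (String × List Int)) :=
  let formula_tokens := PySem.Str.split₀ template_formula
  let parameters := formula_tokens.filter pvIsParam
  let parameters_set := PySem.Set.ofList parameters
  let res := parameters_set.foldl (fun st p =>
      (PySem.List.pyRange 0 (PySem.List.count parameters p : Int) 1).foldl (fun st i =>
        ((pvAFind p (p ++ PySem.Int.toStr i) st.1).1,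
         if (pvAFind p (p ++ PySem.Int.toStr i) st.1).2 then
           st.2.insert (p ++ PySem.Int.toStr i) ((PySem.Dict.mk parameter_domains).getD p [])
         else st.2)) st)
    (formula_tokens, (PySem.Dict.empty : PySem.Dict String (List Int)))
  (PySem.Str.join " " res.1, res.2.items)

-- ===== PORT B =====
-- B's single pass: rename each parameter token with its running occurrence index, keep the counts
def pvBPass (cnt : PySem.Dict String Int) : List String → List String × PySem.Dict String Int
  | [] => ([], cnt)
  | t :: ts =>
    if pvIsParam t then
      ((t ++ PySem.Int.toStr (cnt.getD t 0)) :: (pvBPass (cnt.insert t (cnt.getD t 0 + 1)) ts).1,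
       (pvBPass (cnt.insert t (cnt.getD t 0 + 1)) ts).2)
    else (t :: (pvBPass cnt ts).1, (pvBPass cnt ts).2)

def generate_formula_from_template_alt (template_formula : String) (parameter_domains : List (String × List Int)) : String × (List (String × List Int)) :=
  let r := pvBPass PySem.Dict.empty (PySem.Str.split₀ template_formula)
  let d := r.2.items.foldl (fun d pc =>
      (PySem.List.pyRange 0 pc.2 1).foldl (fun d i =>
        d.insert (pc.1 ++ PySem.Int.toStr i) ((PySem.Dict.mk parameter_domains).getD pc.1 [])) d)
    (PySem.Dict.empty : PySem.Dict String (List Int))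
  (PySem.Str.join " " r.1, d.items)

-- ===== PRECONDITION & SPEC =====
-- Pre_ excludes exactly the inputs where Python A raises KeyError: a parameter token of the
-- formula that is not a key of parameter_domains.
def Pre_generate_formula_from_template (template_formula : String) (parameter_domains : List (String × List Int)) : Prop :=
  ∀ t ∈ PySem.Str.split₀ template_formula, pvIsParam t = true →
    (PySem.Dict.mk parameter_domains).contains t = true
instance (template_formula : String) (parameter_domains : List (String × List Int)) : Decidable (Pre_generate_formula_from_template template_formula parameter_domains) := by unfold Pre_generate_formula_from_template; infer_instance

def pvWitness_generate_formula_from_template : String × (List (String × List Int)) :=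
  ("p1 and p2 -> p1", [("p1", [1, 2]), ("p2", [3])])

def Spec_generate_formula_from_template (template_formula : String) (parameter_domains : List (String × List Int)) (out : String × (List (String × List Int))) : Prop := out = generate_formula_from_template_alt template_formula parameter_domains
instance (template_formula : String) (parameter_domains : List (String × List Int)) (out : String × (List (String × List Int))) : Decidable (Spec_generate_formula_from_template template_formula parameter_domains out) := by unfold Spec_generate_formula_from_template; infer_instance

-- ===== CLAIM (what is proved, stated in full; the proofs are below) =====
def Claim_equal_generate_formula_from_template : Prop := ∀ (template_formula : String) (parameter_domains : List (String × List Int)), Dom_generate_formula_from_template template_formula parameter_domains → Pre_generate_formula_from_template template_formula parameter_domains → Spec_generate_formula_from_template template_formula parameter_domains (generate_formula_from_template template_formula parameter_domains)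

-- ===== LEMMAS AND PROOFS =====

-- occurrence renaming of one parameter p, occurrence indices k, k+1, …
def pvOccRen (p : String) (k : Int) : List String → List String
  | [] => []
  | t :: ts =>
    if t = p then (p ++ PySem.Int.toStr k) :: pvOccRen p (k + 1) ts
    else t :: pvOccRen p k ts

-- simultaneous occurrence renaming of all parameters in P with counter c
def pvMulti (P : List String) (c : String → Int) : List String → List String
  | [] => []
  | t :: ts =>
    if t ∈ P then (t ++ PySem.Int.toStr (c t)) :: pvMulti P (fun s => if s = t then c t + 1 else c s) ts
    else t :: pvMulti P c ts

theorem pvToStr_len_pos (n : Int) : 0 < (PySem.Int.toStr n).toList.length := by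
  rw [PySem.Int.toList_toStr]
  unfold PySem.Int.toChars
  split <;> simp [Nat.length_toDigits_pos]

theorem pvAppend_toStr_len (s : String) (k : Int) :
    (s ++ PySem.Int.toStr k).toList.length = s.toList.length + (PySem.Int.toStr k).toList.length := by
  simp [String.toList_append]

theorem pvAppend_toStr_ne_self (s : String) (k : Int) : s ++ PySem.Int.toStr k ≠ s := by
  intro h
  have h1 := congrArg (fun x => x.toList.length) h
  simp only [pvAppend_toStr_len] at h1
  have := pvToStr_len_pos k
  omega

theorem pvAppend_toStr_ne_len2 (s q : String) (k : Int) (hs : s.toList.length = 2)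
    (hq : q.toList.length = 2) : s ++ PySem.Int.toStr k ≠ q := by
  intro h
  have h1 := congrArg (fun x => x.toList.length) h
  simp only [pvAppend_toStr_len, hq, hs] at h1
  have := pvToStr_len_pos k
  omega

theorem pvIsParam_len (t : String) (h : pvIsParam t = true) : t.toList.length = 2 := by
  unfold pvIsParam at h
  rw [Bool.and_eq_true] at h
  have h2 := h.2
  rw [beq_iff_eq, PySem.Str.len_eq] at h2
  exact_mod_cast h2

theorem pvCount_occRen (p q : String) (hqp : q ≠ p) (hp : p.toList.length = 2)
    (hq : q.toList.length = 2) :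
    ∀ (ts : List String) (k : Int), List.count q (pvOccRen p k ts) = List.count q ts := by
  intro ts
  induction ts with
  | nil => intro k; simp [pvOccRen]
  | cons t ts ih =>
    intro k
    by_cases ht : t = p
    · subst ht
      have hne : (t ++ PySem.Int.toStr k) ≠ q := pvAppend_toStr_ne_len2 t q k hp hq
      simp [pvOccRen, ih, hne, Ne.symm hqp]
    · simp [pvOccRen, ht, List.count_cons, ih]

theorem pvFold_head (p : String) (v : List Int) (l : List Int) :
    ∀ (x : String) (ts : List String) (d : PySem.Dict String (List Int)), x ≠ p →
    l.foldl (fun st i =>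
        ((pvAFind p (p ++ PySem.Int.toStr i) st.1).1,
         if (pvAFind p (p ++ PySem.Int.toStr i) st.1).2 then
           st.2.insert (p ++ PySem.Int.toStr i) v
         else st.2)) (x :: ts, d)
    = (x :: (l.foldl (fun st i =>
        ((pvAFind p (p ++ PySem.Int.toStr i) st.1).1,
         if (pvAFind p (p ++ PySem.Int.toStr i) st.1).2 then
           st.2.insert (p ++ PySem.Int.toStr i) v
         else st.2)) (ts, d)).1,
       (l.foldl (fun st i =>
        ((pvAFind p (p ++ PySem.Int.toStr i) st.1).1,
         if (pvAFind p (p ++ PySem.Int.toStr i) st.1).2 then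
           st.2.insert (p ++ PySem.Int.toStr i) v
         else st.2)) (ts, d)).2) := by
  induction l with
  | nil => intro x ts d hx; simp
  | cons i l ih =>
    intro x ts d hx
    have hxp : (x == p) = false := by simp [hx]
    simp only [List.foldl_cons]
    rw [show (pvAFind p (p ++ PySem.Int.toStr i) (x :: ts)) =
        (x :: (pvAFind p (p ++ PySem.Int.toStr i) ts).1, (pvAFind p (p ++ PySem.Int.toStr i) ts).2) from by
      simp [pvAFind, hxp]]
    exact ih x _ _ hx

theorem pvIter (p : String) (v : List Int) :
    ∀ (ts : List String) (k : Int) (d : PySem.Dict String (List Int)),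
    (PySem.List.pyRange k (k + (List.count p ts : Int)) 1).foldl (fun st i =>
        ((pvAFind p (p ++ PySem.Int.toStr i) st.1).1,
         if (pvAFind p (p ++ PySem.Int.toStr i) st.1).2 then
           st.2.insert (p ++ PySem.Int.toStr i) v
         else st.2)) (ts, d)
    = (pvOccRen p k ts,
       (PySem.List.pyRange k (k + (List.count p ts : Int)) 1).foldl (fun d i =>
         d.insert (p ++ PySem.Int.toStr i) v) d) := by
  intro ts
  induction ts with
  | nil =>
    intro k d
    have h : PySem.List.pyRange k (k + ((List.count p ([] : List String) : Int))) 1 = [] := by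
      simp [PySem.List.pyRange]
    rw [h]
    simp [pvOccRen]
  | cons t ts ih =>
    intro k d
    by_cases ht : t = p
    · subst ht
      have hcnt : List.count t (t :: ts) = List.count t ts + 1 := by
        simp
      rw [hcnt]
      have hlt : k < k + ((List.count t ts + 1 : Nat) : Int) := by push_cast; omega
      rw [PySem.List.pyRange_one_cons hlt]
      simp only [List.foldl_cons]
      rw [show (pvAFind t (t ++ PySem.Int.toStr k) (t :: ts)) =
          ((t ++ PySem.Int.toStr k) :: ts, true) from by simp [pvAFind]]
      simp only [if_true]
      rw [pvFold_head t v _ _ _ _ (pvAppend_toStr_ne_self t k)]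
      have hb : k + ((List.count t ts + 1 : Nat) : Int) = (k + 1) + (List.count t ts : Int) := by
        push_cast; ring
      rw [hb, ih (k + 1) (PySem.Dict.insert d (t ++ PySem.Int.toStr k) v)]
      simp [pvOccRen]
    · have hcnt : List.count p (t :: ts) = List.count p ts := by
        simp [ht]
      rw [hcnt, pvFold_head p v _ _ _ _ ht, ih k d]
      simp [pvOccRen, ht]

theorem pvOuter (pd : List (String × List Int)) (params : List String) :
    ∀ (P : List String) (ts : List String) (d : PySem.Dict String (List Int)),
    P.Nodup → (∀ q ∈ P, q.toList.length = 2) →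
    (∀ q ∈ P, List.count q ts = List.count q params) →
    P.foldl (fun st p =>
      (PySem.List.pyRange 0 (PySem.List.count params p : Int) 1).foldl (fun st i =>
        ((pvAFind p (p ++ PySem.Int.toStr i) st.1).1,
         if (pvAFind p (p ++ PySem.Int.toStr i) st.1).2 then
           st.2.insert (p ++ PySem.Int.toStr i) ((PySem.Dict.mk pd).getD p [])
         else st.2)) st) (ts, d)
    = (P.foldl (fun t p => pvOccRen p 0 t) ts,
       P.foldl (fun d p =>
        (PySem.List.pyRange 0 (PySem.List.count params p : Int) 1).foldl (fun d i =>
          d.insert (p ++ PySem.Int.toStr i) ((PySem.Dict.mk pd).getD p [])) d) d) := by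
  intro P
  induction P with
  | nil => intro ts d _ _ _; simp
  | cons p P ih =>
    intro ts d hnd hlen hcnt
    have hcp : (PySem.List.count params p : Int) = (List.count p ts : Int) := by
      rw [PySem.List.count_eq, ← hcnt p (by simp)]
    simp only [List.foldl_cons]
    rw [hcp]
    have h0 : (List.count p ts : Int) = 0 + (List.count p ts : Int) := by ring
    rw [h0, pvIter p ((PySem.Dict.mk pd).getD p []) ts 0 d]
    rw [ih (pvOccRen p 0 ts) _ hnd.of_cons (fun q hq => hlen q (by simp [hq]))
      (fun q hq => by
        have hqp : q ≠ p := by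
          intro h; subst h; exact (List.nodup_cons.mp hnd).1 hq
        rw [pvCount_occRen p q hqp (hlen p (by simp)) (hlen q (by simp [hq])) ts 0]
        exact hcnt q (by simp [hq]))]

theorem pvMulti_congr (P : List String) :
    ∀ (ts : List String) (c c' : String → Int), (∀ s, c s = c' s) →
    pvMulti P c ts = pvMulti P c' ts := by
  intro ts
  induction ts with
  | nil => intro c c' _; simp [pvMulti]
  | cons t ts ih =>
    intro c c' h
    by_cases ht : t ∈ P
    · simp only [pvMulti, if_pos ht, h t]
      rw [ih (fun s => if s = t then c' t + 1 else c s) (fun s => if s = t then c' t + 1 else c' s)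
        (fun s => by by_cases hs : s = t <;> simp [hs, h s])]
    · simp only [pvMulti, if_neg ht]
      rw [ih c c' h]

theorem pvOccRen_cons_self (p : String) (k : Int) (ts : List String) :
    pvOccRen p k (p :: ts) = (p ++ PySem.Int.toStr k) :: pvOccRen p (k + 1) ts := by
  simp [pvOccRen]

theorem pvOccRen_cons_ne (p t : String) (k : Int) (ts : List String) (h : t ≠ p) :
    pvOccRen p k (t :: ts) = t :: pvOccRen p k ts := by
  simp [pvOccRen, h]

theorem pvMulti_cons_mem (P : List String) (c : String → Int) (t : String) (ts : List String)
    (h : t ∈ P) : pvMulti P c (t :: ts)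
      = (t ++ PySem.Int.toStr (c t)) :: pvMulti P (fun s => if s = t then c t + 1 else c s) ts := by
  simp [pvMulti, h]

theorem pvMulti_cons_not_mem (P : List String) (c : String → Int) (t : String) (ts : List String)
    (h : t ∉ P) : pvMulti P c (t :: ts) = t :: pvMulti P c ts := by
  simp [pvMulti, h]

theorem pvMulti_occRen (p : String) (P : List String) (hp : p ∉ P)
    (hP : ∀ q ∈ P, q.toList.length = 2) (hplen : p.toList.length = 2) :
    ∀ (ts : List String) (c : String → Int) (k : Int),
    pvMulti P c (pvOccRen p k ts) = pvMulti (p :: P) (fun s => if s = p then k else c s) ts := by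
  intro ts
  induction ts with
  | nil => intro c k; simp [pvOccRen, pvMulti]
  | cons t ts ih =>
    intro c k
    by_cases ht : t = p
    · subst ht
      have hmem : (t ++ PySem.Int.toStr k) ∉ P := fun hmem =>
        pvAppend_toStr_ne_len2 t (t ++ PySem.Int.toStr k) k hplen (hP _ hmem) rfl
      have htP' : t ∈ t :: P := by simp
      rw [pvOccRen_cons_self, pvMulti_cons_not_mem P c _ _ hmem, pvMulti_cons_mem _ _ _ _ htP',
        ih c (k + 1)]
      refine congrArg₂ (fun (a : String) (l : List String) => a :: l) (by simp)
        (pvMulti_congr (t :: P) ts _ _ (fun s => ?_))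
      by_cases hs : s = t <;> simp [hs]
    · by_cases htP : t ∈ P
      · have htP' : t ∈ p :: P := by simp [htP]
        rw [pvOccRen_cons_ne p t k ts ht, pvMulti_cons_mem _ _ _ _ htP,
          pvMulti_cons_mem _ _ _ _ htP', ih (fun s => if s = t then c t + 1 else c s) k]
        refine congrArg₂ (fun (a : String) (l : List String) => a :: l) (by simp [ht])
          (pvMulti_congr (p :: P) ts _ _ (fun s => ?_))
        by_cases hs : s = t
        · subst hs; simp [ht]
        · by_cases hsp : s = p <;> simp [hs, hsp, Ne.symm ht]
      · have htP' : t ∉ p :: P := by simp [ht, htP]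
        rw [pvOccRen_cons_ne p t k ts ht, pvMulti_cons_not_mem _ _ _ _ htP,
          pvMulti_cons_not_mem _ _ _ _ htP', ih c k]

theorem pvMulti_nil : ∀ (c : String → Int) (ts : List String), pvMulti [] c ts = ts := by
  intro c ts
  induction ts generalizing c with
  | nil => simp [pvMulti]
  | cons t ts ih => simp [pvMulti, ih]

theorem pvFold_occRen_multi :
    ∀ (P : List String) (ts : List String), P.Nodup → (∀ q ∈ P, q.toList.length = 2) →
    P.foldl (fun t p => pvOccRen p 0 t) ts = pvMulti P (fun _ => 0) ts := by
  intro P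
  induction P with
  | nil => intro ts _ _; simp [pvMulti_nil]
  | cons p P ih =>
    intro ts hnd hlen
    simp only [List.foldl_cons]
    rw [ih (pvOccRen p 0 ts) hnd.of_cons (fun q hq => hlen q (by simp [hq]))]
    rw [pvMulti_occRen p P (List.nodup_cons.mp hnd).1 (fun q hq => hlen q (by simp [hq]))
      (hlen p (by simp)) ts (fun _ => 0) 0]
    exact pvMulti_congr (p :: P) ts _ _ (fun s => by by_cases hs : s = p <;> simp [hs])

theorem pvBPass_fst :
    ∀ (ts : List String) (cnt : PySem.Dict String Int) (c : String → Int) (P : List String),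
    (∀ s, cnt.getD s 0 = c s) → (∀ t ∈ ts, pvIsParam t = true ↔ t ∈ P) →
    (pvBPass cnt ts).1 = pvMulti P c ts := by
  intro ts
  induction ts with
  | nil => intro cnt c P _ _; simp [pvBPass, pvMulti]
  | cons t ts ih =>
    intro cnt c P hc hP
    cases hpt : pvIsParam t with
    | true =>
      have htP : t ∈ P := (hP t (by simp)).mp hpt
      simp only [pvBPass, hpt, if_true, pvMulti, if_pos htP, hc t]
      rw [ih (cnt.insert t (c t + 1)) (fun s => if s = t then c t + 1 else c s) P
        (fun s => by rw [PySem.Dict.getD_insert]; by_cases hs : s = t <;> simp [hs, hc s])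
        (fun x hx => hP x (by simp [hx]))]
    | false =>
      have htP : t ∉ P := fun h => by simp [(hP t (by simp)).mpr h] at hpt
      simp only [pvBPass, hpt, Bool.false_eq_true, if_false, pvMulti, if_neg htP]
      rw [ih cnt c P hc (fun x hx => hP x (by simp [hx]))]

theorem pvBPass_snd :
    ∀ (ts : List String) (cnt : PySem.Dict String Int),
    (pvBPass cnt ts).2 = (ts.filter pvIsParam).foldl (fun d x => d.insert x (d.getD x 0 + 1)) cnt := by
  intro ts
  induction ts with
  | nil => intro cnt; simp [pvBPass]
  | cons t ts ih =>
    intro cnt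
    cases hpt : pvIsParam t with
    | true => simp [pvBPass, hpt, ih]
    | false => simp [pvBPass, hpt, ih]

theorem pvMain (tf : String) (pd : List (String × List Int)) :
    generate_formula_from_template tf pd = generate_formula_from_template_alt tf pd := by
  unfold generate_formula_from_template generate_formula_from_template_alt
  simp only
  have hnd : (PySem.Set.ofList ((PySem.Str.split₀ tf).filter pvIsParam)).Nodup :=
    PySem.Set.nodup_ofList _
  have hlen : ∀ q ∈ PySem.Set.ofList ((PySem.Str.split₀ tf).filter pvIsParam),
      q.toList.length = 2 := fun q hq =>
    pvIsParam_len q (List.of_mem_filter ((PySem.Set.mem_ofList _ _).mp hq))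
  have hcnt : ∀ q ∈ PySem.Set.ofList ((PySem.Str.split₀ tf).filter pvIsParam),
      List.count q (PySem.Str.split₀ tf) = List.count q ((PySem.Str.split₀ tf).filter pvIsParam) := by
    intro q hq
    exact (List.count_filter (List.of_mem_filter ((PySem.Set.mem_ofList _ _).mp hq))).symm
  rw [pvOuter pd ((PySem.Str.split₀ tf).filter pvIsParam) _ _ _ hnd hlen hcnt]
  have hiff : ∀ t ∈ PySem.Str.split₀ tf, pvIsParam t = true ↔
      t ∈ PySem.Set.ofList ((PySem.Str.split₀ tf).filter pvIsParam) := by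
    intro t htm
    rw [PySem.Set.mem_ofList, List.mem_filter]
    exact ⟨fun h => ⟨htm, h⟩, fun h => h.2⟩
  have htok : (pvBPass PySem.Dict.empty (PySem.Str.split₀ tf)).1
      = (PySem.Set.ofList ((PySem.Str.split₀ tf).filter pvIsParam)).foldl
          (fun t p => pvOccRen p 0 t) (PySem.Str.split₀ tf) := by
    rw [pvFold_occRen_multi _ _ hnd hlen]
    exact pvBPass_fst (PySem.Str.split₀ tf) PySem.Dict.empty (fun _ => 0) _
      (fun s => PySem.Dict.getD_empty s 0) hiff
  have hdict : (pvBPass PySem.Dict.empty (PySem.Str.split₀ tf)).2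
      = PySem.Dict.counter ((PySem.Str.split₀ tf).filter pvIsParam) := by
    rw [pvBPass_snd]
    exact PySem.Dict.foldl_insert_getD_add_one_eq_counter _
  rw [htok, hdict, PySem.Dict.items_counter, List.foldl_map]
  simp only [PySem.List.count_eq]

-- ===== VERDICT (by name: the statement is the Claim_ definition above) =====
theorem generate_formula_from_template_spec : Claim_equal_generate_formula_from_template := by
  intro tf pd _ _
  exact pvMain tf pd
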